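-- pv_equiv track=rewrite | github.com/coin-maker3/pulsewebhook | main.py | _open_positions
-- ===== SOURCE A (Python) =====
-- def _open_positions(trades: list) -> dict:
--     """Return dict of symbol -> trade for currently open positions."""
--     open_pos = {}
--     for t in trades:
--         sym = t.get("symbol")
--         if t.get("status") == "open":
--             open_pos[sym] = t
--         elif t.get("status") in ("closed", "stopped"):
--             open_pos.pop(sym, None)
--     return open_pos
-- ===== SOURCE B (Python) =====
-- def _open_positions(trades: list) -> dict:
--     """Return dict of symbol -> trade for currently open positions.
--
--     Two-pass version: first record each symbol's last closing index, then a
--     single forward scan keeps only 'open' trades that come after their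
--     symbol's last close (the first such open fixes the dict position, the
--     last one supplies the value) -- no pops needed.
--     """
--     last_close = {}
--     for i, t in enumerate(trades):
--         if t.get("status") in ("closed", "stopped"):
--             last_close[t.get("symbol")] = i
--     open_pos = {}
--     for i, t in enumerate(trades):
--         if t.get("status") == "open":
--             sym = t.get("symbol")
--             if i > last_close.get(sym, -1):
--                 open_pos[sym] = t
--     return open_pos
-- ===== Notes on version B (the rewrite author's own statement) =====
-- stated objective: alternative
-- what changed: Replaces A's single insert/pop dict simulation with two passes: precompute each symbol's last closing index, then one forward scan that keeps an 'open' trade iff it comes after its symbol's last close, so pops disappear entirely.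
import Mathlib
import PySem

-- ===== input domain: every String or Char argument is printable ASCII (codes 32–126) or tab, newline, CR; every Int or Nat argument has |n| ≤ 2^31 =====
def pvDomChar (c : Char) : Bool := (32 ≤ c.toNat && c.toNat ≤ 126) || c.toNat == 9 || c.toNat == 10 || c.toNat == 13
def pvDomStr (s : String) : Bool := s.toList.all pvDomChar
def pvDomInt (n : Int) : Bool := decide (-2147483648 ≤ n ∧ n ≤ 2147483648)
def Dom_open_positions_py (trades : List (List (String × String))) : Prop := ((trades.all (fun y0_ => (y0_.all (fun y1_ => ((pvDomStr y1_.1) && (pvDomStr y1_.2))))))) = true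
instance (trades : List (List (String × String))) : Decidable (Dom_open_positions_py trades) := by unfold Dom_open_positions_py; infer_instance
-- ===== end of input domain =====

-- B replaces A's insert/pop dict simulation by two passes (a last-close index, then one
-- filtered forward scan with no pops); objective: alternative decomposition, same cost.

-- common primitive: Python's t.get(k) on a dict given as an association list (first match)
def pvGet (t : List (String × String)) (k : String) : Option String :=
  (t.find? (fun p => p.1 == k)).map (·.2)

-- t.get("status") == "open"
def pvOpenQ (t : List (String × String)) : Bool := pvGet t "status" == some "open"
-- t.get("status") in ("closed", "stopped")
def pvCloseQ (t : List (String × String)) : Bool :=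
  pvGet t "status" == some "closed" || pvGet t "status" == some "stopped"

-- ===== PORT A =====
-- loop body of A: open -> open_pos[sym] = t ; closed/stopped -> open_pos.pop(sym, None)
-- (keys are Option String because t.get("symbol") may be None; under Pre_ every surviving key is `some`)
def pvStepA (d : PySem.Dict (Option String) (List (String × String)))
    (t : List (String × String)) : PySem.Dict (Option String) (List (String × String)) :=
  let sym := pvGet t "symbol"
  if pvOpenQ t then d.insert sym t
  else if pvCloseQ t then d.erase sym
  else d

def open_positions_py (trades : List (List (String × String))) : List (String × List (String × String)) :=
  let d := trades.foldl pvStepA PySem.Dict.empty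
  -- dict -> the declared String-keyed type; under Pre_ every key is `some s`, so `getD ""` is exact
  d.items.map (fun p => (p.1.getD "", p.2))

-- ===== PORT B =====
-- first pass of B: last_close[t.get("symbol")] = i for closing trades
def pvStepLC (d : PySem.Dict (Option String) Int) (p : Int × List (String × String)) :
    PySem.Dict (Option String) Int :=
  if pvCloseQ p.2 then d.insert (pvGet p.2 "symbol") p.1 else d

-- second pass of B: keep an 'open' trade iff i > last_close.get(sym, -1)
def pvStepB (lc : PySem.Dict (Option String) Int)
    (d : PySem.Dict (Option String) (List (String × String)))
    (p : Int × List (String × String)) : PySem.Dict (Option String) (List (String × String)) :=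
  if pvOpenQ p.2 then
    let sym := pvGet p.2 "symbol"
    if lc.getD sym (-1) < p.1 then d.insert sym p.2 else d
  else d

def open_positions_py_alt (trades : List (List (String × String))) : List (String × List (String × String)) :=
  let lastClose := (PySem.List.enumerate trades).foldl pvStepLC PySem.Dict.empty
  let pos := (PySem.List.enumerate trades).foldl (pvStepB lastClose) PySem.Dict.empty
  pos.items.map (fun p => (p.1.getD "", p.2))

-- ===== PRECONDITION & SPEC =====
-- Pre_ excludes only inputs where some trade with status "open" lacks a "symbol" key: there A
-- returns a dict with key None, which is not a value of the declared String-keyed type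
-- (B builds the same None-keyed dict in Python).
def Pre_open_positions_py (trades : List (List (String × String))) : Prop :=
  ∀ t ∈ trades, pvOpenQ t = true → (pvGet t "symbol").isSome = true

instance (trades : List (List (String × String))) : Decidable (Pre_open_positions_py trades) := by
  unfold Pre_open_positions_py; infer_instance

def pvWitness_open_positions_py : (List (List (String × String))) :=
  [[("symbol", "BTC"), ("status", "open")], [("symbol", "ETH"), ("status", "closed")]]

def Spec_open_positions_py (trades : List (List (String × String))) (out : List (String × List (String × String))) : Prop := out = open_positions_py_alt trades
instance (trades : List (List (String × String))) (out : List (String × List (String × String))) : Decidable (Spec_open_positions_py trades out) := by unfold Spec_open_positions_py; infer_instance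

-- ===== CLAIM (what is proved, stated in full; the proofs are below) =====
def Claim_equal_open_positions_py : Prop := ∀ (trades : List (List (String × String))), Dom_open_positions_py trades → Pre_open_positions_py trades → Spec_open_positions_py trades (open_positions_py trades)

-- ===== LEMMAS AND PROOFS =====

-- filter of a dict by a key predicate (proof device: A's state, restricted to the symbols
-- that no later trade closes, is B's state)
def pvDFilter (p : Option String → Bool)
    (d : PySem.Dict (Option String) (List (String × String))) :
    PySem.Dict (Option String) (List (String × String)) :=
  ⟨d.items.filter (fun kv => p kv.1)⟩

-- no trade in l closes symbol k
def pvAlive (l : List (List (String × String))) (k : Option String) : Bool :=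
  l.all (fun t => !(pvCloseQ t && (pvGet t "symbol" == k)))

theorem pvFilterAny (p : Option String → Bool) (k : Option String) (h : p k = true)
    (l : List ((Option String) × List (String × String))) :
    (l.filter (fun kv => p kv.1)).any (fun q => q.1 == k) = l.any (fun q => q.1 == k) := by
  induction l with
  | nil => rfl
  | cons q l ih =>
    by_cases hq : q.1 = k
    · simp [hq, h]
    · simp only [List.filter_cons]
      cases hpq : p q.1 <;> simp [hq, ih]

theorem pvFilterMapTrue (p : Option String → Bool) (k : Option String)
    (v : List (String × String)) (h : p k = true)
    (l : List ((Option String) × List (String × String))) :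
    (l.map (fun q => if q.1 == k then (k, v) else q)).filter (fun kv => p kv.1)
      = (l.filter (fun kv => p kv.1)).map (fun q => if q.1 == k then (k, v) else q) := by
  induction l with
  | nil => rfl
  | cons q l ih =>
    simp only [beq_iff_eq] at ih
    by_cases hq : q.1 = k
    · simp [hq, h, ih]
    · simp only [List.map_cons, List.filter_cons, beq_iff_eq, if_neg hq]
      cases hpq : p q.1 <;> simp [hq, hpq, ih]

theorem pvFilterMapFalse (p : Option String → Bool) (k : Option String)
    (v : List (String × String)) (h : p k = false)
    (l : List ((Option String) × List (String × String))) :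
    (l.map (fun q => if q.1 == k then (k, v) else q)).filter (fun kv => p kv.1)
      = l.filter (fun kv => p kv.1) := by
  induction l with
  | nil => rfl
  | cons q l ih =>
    simp only [beq_iff_eq] at ih
    by_cases hq : q.1 = k
    · simp [hq, h, ih]
    · simp only [List.map_cons, List.filter_cons, beq_iff_eq, if_neg hq]
      cases hpq : p q.1 <;> simp [hq, hpq, ih]

theorem pvDFilter_insert_true (p : Option String → Bool)
    (d : PySem.Dict (Option String) (List (String × String))) (k : Option String)
    (v : List (String × String)) (h : p k = true) :
    pvDFilter p (d.insert k v) = (pvDFilter p d).insert k v := by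
  unfold pvDFilter PySem.Dict.insert PySem.Dict.contains
  by_cases hc : (d.items.any fun q => q.1 == k) = true
  · simp only [pvFilterAny p k h, hc, if_pos]
    exact congrArg PySem.Dict.mk (pvFilterMapTrue p k v h d.items)
  · rw [if_neg hc, if_neg (by simpa [pvFilterAny p k h] using hc)]
    exact congrArg PySem.Dict.mk (by simp [List.filter_append, h])

theorem pvDFilter_insert_false (p : Option String → Bool)
    (d : PySem.Dict (Option String) (List (String × String))) (k : Option String)
    (v : List (String × String)) (h : p k = false) :
    pvDFilter p (d.insert k v) = pvDFilter p d := by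
  unfold pvDFilter PySem.Dict.insert
  by_cases hc : d.contains k = true
  · rw [if_pos hc]
    exact congrArg PySem.Dict.mk (pvFilterMapFalse p k v h d.items)
  · rw [if_neg hc]
    exact congrArg PySem.Dict.mk (by simp [List.filter_append, h])

theorem pvDFilter_erase (p : Option String → Bool)
    (d : PySem.Dict (Option String) (List (String × String))) (k0 : Option String) :
    pvDFilter p (d.erase k0) = pvDFilter (fun k => p k && !(k == k0)) d := by
  unfold pvDFilter PySem.Dict.erase
  exact congrArg PySem.Dict.mk (by rw [List.filter_filter])
theorem pvLC_lt_iff (l : List (List (String × String))) (s j : Int)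
    (d : PySem.Dict (Option String) Int) (k : Option String) (hj : j ≤ s) :
    (((PySem.List.enumerate l s).foldl pvStepLC d).getD k (-1) < j ↔
      (d.getD k (-1) < j ∧ pvAlive l k = true)) := by
  induction l generalizing s d with
  | nil => simp [PySem.List.enumerate_nil, pvAlive]
  | cons t l ih =>
    rw [PySem.List.enumerate_cons, List.foldl_cons]
    by_cases hc : pvCloseQ t = true
    · rw [show pvStepLC d (s, t) = d.insert (pvGet t "symbol") s from by simp [pvStepLC, hc]]
      rw [ih (s + 1) _ (by omega)]
      by_cases hk : k = pvGet t "symbol"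
      · have hns : ¬ (s < j) := by omega
        simp [hk, pvAlive, hc, hns]
      · have hb : (pvGet t "symbol" == k) = false := by simp [Ne.symm hk]
        simp [PySem.Dict.getD_insert, hk, pvAlive, hc, hb]
    · rw [show pvStepLC d (s, t) = d from by simp [pvStepLC, hc]]
      rw [ih (s + 1) _ (by omega)]
      simp [pvAlive, hc]

theorem pvLC_bound (l : List (List (String × String))) (s : Int)
    (d : PySem.Dict (Option String) Int) (hd : ∀ k, d.getD k (-1) < s) (k : Option String) :
    ((PySem.List.enumerate l s).foldl pvStepLC d).getD k (-1) < s + l.length := by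
  induction l generalizing s d with
  | nil => simpa using hd k
  | cons t l ih =>
    rw [PySem.List.enumerate_cons, List.foldl_cons]
    have hstep : ∀ k', (pvStepLC d (s, t)).getD k' (-1) < s + 1 := by
      intro k'
      unfold pvStepLC
      by_cases hc : pvCloseQ t = true
      · simp only [hc, if_pos, PySem.Dict.getD_insert]
        split_ifs
        · omega
        · have := hd k'; omega
      · rw [if_neg hc]
        have := hd k'; omega
    have h2 := ih (s + 1) _ hstep
    simp only [List.length_cons, Nat.cast_add, Nat.cast_one] at h2 ⊢
    omega

theorem pvDFilter_true (d : PySem.Dict (Option String) (List (String × String))) :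
    pvDFilter (fun _ => true) d = d := by
  unfold pvDFilter
  simp

theorem pvDFilter_congr (p q : Option String → Bool)
    (d : PySem.Dict (Option String) (List (String × String))) (h : ∀ k, p k = q k) :
    pvDFilter p d = pvDFilter q d := by
  unfold pvDFilter
  congr 1
  exact List.filter_congr (fun kv _ => h kv.1)

set_option maxHeartbeats 1000000 in
theorem pvSim (suffix pre : List (List (String × String)))
    (dA dB : PySem.Dict (Option String) (List (String × String)))
    (hinv : dB = pvDFilter (pvAlive suffix) dA) :
    (PySem.List.enumerate suffix (pre.length : Int)).foldl
        (pvStepB ((PySem.List.enumerate (pre ++ suffix)).foldl pvStepLC PySem.Dict.empty)) dB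
      = pvDFilter (fun _ => true) (suffix.foldl pvStepA dA) := by
  induction suffix generalizing pre dA dB with
  | nil =>
    rw [PySem.List.enumerate_nil, List.foldl_nil, List.foldl_nil, hinv]
    exact pvDFilter_congr _ _ _ (fun k => by simp [pvAlive])
  | cons t l ih =>
    rw [PySem.List.enumerate_cons, List.foldl_cons, List.foldl_cons]
    have hlen : ((pre ++ [t]).length : Int) = (pre.length : Int) + 1 := by
      simp
    have happ : (pre ++ [t]) ++ l = pre ++ t :: l := by simp
    by_cases ho : pvOpenQ t = true
    · have hst : pvGet t "status" = some "open" := by simpa [pvOpenQ] using ho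
      have hc : pvCloseQ t = false := by simp [pvCloseQ, hst]
      have hcons : ∀ k, pvAlive (t :: l) k = pvAlive l k := by
        intro k; simp [pvAlive, hc]
      have hg : (((PySem.List.enumerate (pre ++ t :: l)).foldl pvStepLC
            PySem.Dict.empty).getD (pvGet t "symbol") (-1) < (pre.length : Int)) ↔
            pvAlive (t :: l) (pvGet t "symbol") = true := by
        rw [show PySem.List.enumerate (pre ++ t :: l) = PySem.List.enumerate (pre ++ t :: l) 0 from rfl]
        rw [PySem.List.enumerate_append, List.foldl_append]
        rw [show (0 : Int) + (pre.length : Int) = (pre.length : Int) by ring]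
        rw [pvLC_lt_iff (t :: l) (pre.length : Int) (pre.length : Int) _ (pvGet t "symbol") le_rfl]
        have hb : ((PySem.List.enumerate pre 0).foldl pvStepLC PySem.Dict.empty).getD
            (pvGet t "symbol") (-1) < (pre.length : Int) := by
          have := pvLC_bound pre 0 PySem.Dict.empty
            (fun k'' => by simp [PySem.Dict.getD_empty]) (pvGet t "symbol")
          simpa using this
        simp [hb]
      have hA : pvStepA dA t = dA.insert (pvGet t "symbol") t := by
        simp [pvStepA, ho]
      rw [hA]
      by_cases ha : pvAlive l (pvGet t "symbol") = true
      · have hgv : ((PySem.List.enumerate (pre ++ t :: l)).foldl pvStepLC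
              PySem.Dict.empty).getD (pvGet t "symbol") (-1) < (pre.length : Int) := by
          rw [hg, hcons]; exact ha
        have hB : pvStepB ((PySem.List.enumerate (pre ++ t :: l)).foldl pvStepLC PySem.Dict.empty)
            dB ((pre.length : Int), t) = dB.insert (pvGet t "symbol") t := by
          unfold pvStepB
          rw [if_pos ho, if_pos hgv]
        rw [hB]
        have hinv' : dB.insert (pvGet t "symbol") t
            = pvDFilter (pvAlive l) (dA.insert (pvGet t "symbol") t) := by
          rw [pvDFilter_insert_true _ _ _ _ ha, hinv, pvDFilter_congr _ _ _ hcons]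
        have h := ih (pre ++ [t]) (dA.insert (pvGet t "symbol") t)
          (dB.insert (pvGet t "symbol") t) hinv'
        rw [hlen, happ] at h
        exact h
      · have hgv : ¬ ((PySem.List.enumerate (pre ++ t :: l)).foldl pvStepLC
              PySem.Dict.empty).getD (pvGet t "symbol") (-1) < (pre.length : Int) := by
          rw [hg, hcons]; exact ha
        have hB : pvStepB ((PySem.List.enumerate (pre ++ t :: l)).foldl pvStepLC PySem.Dict.empty)
            dB ((pre.length : Int), t) = dB := by
          unfold pvStepB
          rw [if_pos ho, if_neg hgv]
        rw [hB]
        have hinv' : dB = pvDFilter (pvAlive l) (dA.insert (pvGet t "symbol") t) := by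
          rw [pvDFilter_insert_false _ _ _ _ (by simpa using ha), hinv,
            pvDFilter_congr _ _ _ hcons]
        have h := ih (pre ++ [t]) (dA.insert (pvGet t "symbol") t) dB hinv'
        rw [hlen, happ] at h
        exact h
    · have hB : pvStepB ((PySem.List.enumerate (pre ++ t :: l)).foldl pvStepLC PySem.Dict.empty)
          dB ((pre.length : Int), t) = dB := by
        unfold pvStepB
        rw [if_neg ho]
      rw [hB]
      by_cases hc : pvCloseQ t = true
      · have hA : pvStepA dA t = dA.erase (pvGet t "symbol") := by
          simp [pvStepA, ho, hc]
        rw [hA]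
        have hinv' : dB = pvDFilter (pvAlive l) (dA.erase (pvGet t "symbol")) := by
          rw [pvDFilter_erase, hinv]
          exact pvDFilter_congr _ _ _ (fun k => by
            rw [Bool.beq_comm (a := k)]
            simp [pvAlive, hc, Bool.and_comm])
        have h := ih (pre ++ [t]) (dA.erase (pvGet t "symbol")) dB hinv'
        rw [hlen, happ] at h
        exact h
      · have hA : pvStepA dA t = dA := by
          simp [pvStepA, ho, hc]
        rw [hA]
        have hcons : ∀ k, pvAlive (t :: l) k = pvAlive l k := by
          intro k; simp [pvAlive, hc]
        have h := ih (pre ++ [t]) dA dB (by rw [hinv, pvDFilter_congr _ _ _ hcons])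
        rw [hlen, happ] at h
        exact h

-- ===== VERDICT (by name: the statement is the Claim_ definition above) =====
theorem open_positions_py_spec : Claim_equal_open_positions_py := by
  intro trades _ _
  unfold Spec_open_positions_py open_positions_py open_positions_py_alt
  have h := pvSim trades [] PySem.Dict.empty PySem.Dict.empty rfl
  simp only [List.nil_append, List.length_nil, Int.natCast_zero] at h
  dsimp only
  rw [h, pvDFilter_true]
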